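-- pv_equiv track=rewrite | github.com/wlgns3511-crypto/ingredipeek | scripts/fetch-v2.py | parse_allergens
-- ===== SOURCE A (Python) =====
-- def parse_allergens(allergens_tags: list) -> dict:
--     tags = set(t.lower() for t in allergens_tags)
--     return {
--         "allergen_milk": 1 if any("milk" in t or "dairy" in t for t in tags) else 0,
--         "allergen_gluten": 1 if any("gluten" in t or "wheat" in t for t in tags) else 0,
--         "allergen_nuts": 1 if any("nuts" in t and "peanut" not in t for t in tags) else 0,
--         "allergen_soy": 1 if any("soy" in t for t in tags) else 0,
--         "allergen_eggs": 1 if any("egg" in t for t in tags) else 0,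
--         "allergen_fish": 1 if any("fish" in t for t in tags) else 0,
--         "allergen_shellfish": 1 if any("shellfish" in t or "crustacean" in t for t in tags) else 0,
--         "allergen_peanuts": 1 if any("peanut" in t for t in tags) else 0,
--     }
-- ===== SOURCE B (Python) =====
-- def parse_allergens(allergens_tags: list) -> dict:
--     # One newline-joined blob per question instead of per-tag scans: a pattern
--     # (all letters) cannot span the "\n" separator, so "pat in blob" holds iff
--     # some tag contains it; the nuts rule searches a blob of peanut-free tags.
--     blob = "\n".join(t.lower() for t in allergens_tags)
--     nut_blob = "\n".join(t.lower() for t in allergens_tags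
--                          if "peanut" not in t.lower())
--     return {
--         "allergen_milk": 1 if ("milk" in blob or "dairy" in blob) else 0,
--         "allergen_gluten": 1 if ("gluten" in blob or "wheat" in blob) else 0,
--         "allergen_nuts": 1 if "nuts" in nut_blob else 0,
--         "allergen_soy": 1 if "soy" in blob else 0,
--         "allergen_eggs": 1 if "egg" in blob else 0,
--         "allergen_fish": 1 if "fish" in blob else 0,
--         "allergen_shellfish": 1 if ("shellfish" in blob or "crustacean" in blob) else 0,
--         "allergen_peanuts": 1 if "peanut" in blob else 0,
--     }
-- ===== Notes on version B (the rewrite author's own statement) =====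
-- stated objective: alternative
-- what changed: Replaces A's set construction plus eight any() scans over individual tags with two newline-joined blob strings (all lowered tags, and the peanut-free tags) queried by eight direct substring searches; the all-letter patterns cannot span the newline separator, so a blob hit is exactly a per-tag hit.
import Mathlib
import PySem

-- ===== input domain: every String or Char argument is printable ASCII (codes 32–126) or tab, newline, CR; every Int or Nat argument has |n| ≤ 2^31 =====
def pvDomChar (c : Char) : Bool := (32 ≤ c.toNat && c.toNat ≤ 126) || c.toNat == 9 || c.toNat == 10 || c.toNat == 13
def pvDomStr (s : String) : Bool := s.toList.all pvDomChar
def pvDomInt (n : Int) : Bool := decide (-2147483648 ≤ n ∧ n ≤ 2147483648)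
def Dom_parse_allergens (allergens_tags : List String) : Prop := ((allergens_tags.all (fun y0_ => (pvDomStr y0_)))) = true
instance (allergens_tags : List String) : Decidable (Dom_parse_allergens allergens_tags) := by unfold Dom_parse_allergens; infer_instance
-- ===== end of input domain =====

-- B replaces A's set construction plus eight any() scans over individual tags by two
-- newline-joined blob strings searched directly (alternative algorithm, same result).

-- ===== PORT A =====
-- the eight per-tag conditions of A's any() generators, as plain predicate helpers
def pvMilk (t : String) : Bool := PySem.Str.isIn "milk" t || PySem.Str.isIn "dairy" t
def pvGluten (t : String) : Bool := PySem.Str.isIn "gluten" t || PySem.Str.isIn "wheat" t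
def pvNuts (t : String) : Bool := PySem.Str.isIn "nuts" t && !(PySem.Str.isIn "peanut" t)
def pvSoy (t : String) : Bool := PySem.Str.isIn "soy" t
def pvEggs (t : String) : Bool := PySem.Str.isIn "egg" t
def pvFish (t : String) : Bool := PySem.Str.isIn "fish" t
def pvShellfish (t : String) : Bool := PySem.Str.isIn "shellfish" t || PySem.Str.isIn "crustacean" t
def pvPeanuts (t : String) : Bool := PySem.Str.isIn "peanut" t

def parse_allergens (allergens_tags : List String) : List (String × Int) :=
  -- tags = set(t.lower() for t in allergens_tags); each any() over the set is order-independent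
  let tags : PySem.Set String :=
    PySem.Set.ofList (allergens_tags.map (fun t => PySem.Str.lower t))
  [ ("allergen_milk", if tags.any pvMilk then 1 else 0),
    ("allergen_gluten", if tags.any pvGluten then 1 else 0),
    ("allergen_nuts", if tags.any pvNuts then 1 else 0),
    ("allergen_soy", if tags.any pvSoy then 1 else 0),
    ("allergen_eggs", if tags.any pvEggs then 1 else 0),
    ("allergen_fish", if tags.any pvFish then 1 else 0),
    ("allergen_shellfish", if tags.any pvShellfish then 1 else 0),
    ("allergen_peanuts", if tags.any pvPeanuts then 1 else 0) ]

-- ===== PORT B =====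
-- two joined blobs, eight direct substring searches; no per-tag predicate loop
def parse_allergens_alt (allergens_tags : List String) : List (String × Int) :=
  let blob := PySem.Str.join "\n" (allergens_tags.map (fun t => PySem.Str.lower t))
  let nut_blob := PySem.Str.join "\n"
    ((allergens_tags.filter (fun t => !(PySem.Str.isIn "peanut" (PySem.Str.lower t)))).map
      (fun t => PySem.Str.lower t))
  [ ("allergen_milk", if PySem.Str.isIn "milk" blob || PySem.Str.isIn "dairy" blob then 1 else 0),
    ("allergen_gluten", if PySem.Str.isIn "gluten" blob || PySem.Str.isIn "wheat" blob then 1 else 0),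
    ("allergen_nuts", if PySem.Str.isIn "nuts" nut_blob then 1 else 0),
    ("allergen_soy", if PySem.Str.isIn "soy" blob then 1 else 0),
    ("allergen_eggs", if PySem.Str.isIn "egg" blob then 1 else 0),
    ("allergen_fish", if PySem.Str.isIn "fish" blob then 1 else 0),
    ("allergen_shellfish", if PySem.Str.isIn "shellfish" blob || PySem.Str.isIn "crustacean" blob then 1 else 0),
    ("allergen_peanuts", if PySem.Str.isIn "peanut" blob then 1 else 0) ]

-- ===== PRECONDITION & SPEC =====
def Spec_parse_allergens (allergens_tags : List String) (out : List (String × Int)) : Prop := out = parse_allergens_alt allergens_tags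
instance (allergens_tags : List String) (out : List (String × Int)) : Decidable (Spec_parse_allergens allergens_tags out) := by unfold Spec_parse_allergens; infer_instance

-- ===== CLAIM (what is proved, stated in full; the proofs are below) =====
def Claim_equal_parse_allergens : Prop := ∀ (allergens_tags : List String), Dom_parse_allergens allergens_tags → Spec_parse_allergens allergens_tags (parse_allergens allergens_tags)

-- ===== LEMMAS AND PROOFS =====
-- a pattern not containing c cannot span the separator c: infix of a ++ c :: b splits
theorem pv_infix_split {p a b : List Char} {c : Char} (hc : c ∉ p) :
    p <:+: a ++ c :: b ↔ p <:+: a ∨ p <:+: b := by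
  constructor
  · rintro ⟨s, t, h⟩
    by_cases h1 : s.length + p.length ≤ a.length
    · left
      have hpre : s ++ p <+: a := by
        apply List.prefix_of_prefix_length_le (l₃ := a ++ c :: b)
        · exact ⟨t, by simpa [List.append_assoc] using h⟩
        · exact List.prefix_append a (c :: b)
        · simpa using h1
      exact (List.suffix_append s p).isInfix.trans hpre.isInfix
    · by_cases h2 : a.length + 1 ≤ s.length
      · right
        have hsuf : p ++ t <:+ b := by
          -- s ++ (p ++ t) = a ++ c :: b, and (p ++ t).length ≤ b.length
          apply List.suffix_of_suffix_length_le (l₃ := a ++ c :: b)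
          · exact ⟨s, by simpa [List.append_assoc] using h⟩
          · exact (List.suffix_cons c b).trans (List.suffix_append a (c :: b))
          · have hL := congrArg List.length h
            simp only [List.length_append, List.length_cons] at hL
            simp only [List.length_append]
            omega
        exact (List.prefix_append p t).isInfix.trans hsuf.isInfix
      · exfalso
        simp only [not_le] at h1 h2
        have hlt : a.length < (s ++ p).length := by simp; omega
        have hge : s.length ≤ a.length := by omega
        have hl2 : a.length - s.length < p.length := by omega
        have h' : (s ++ p) ++ t = a ++ c :: b := by simpa [List.append_assoc] using h
        have e3 : ((s ++ p) ++ t)[a.length]'(by simp [h']) = c := by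
          simp only [h']
          rw [List.getElem_append_right (Nat.le_refl _)]
          simp
        have e1 : ((s ++ p) ++ t)[a.length]'(by simp [h']) = p[a.length - s.length]'hl2 := by
          rw [List.getElem_append_left hlt, List.getElem_append_right hge]
        exact hc ((e1.symm.trans e3) ▸ List.getElem_mem hl2)
  · rintro (h | h)
    · exact h.trans (List.prefix_append a (c :: b)).isInfix
    · exact h.trans ((List.suffix_cons c b).trans (List.suffix_append a (c :: b))).isInfix

-- 'p in c.join(xs)' is 'any(p in x for x in xs)' when p is nonempty and avoids c
theorem pv_isIn_join (c : Char) (p : List Char) (hp : p ≠ []) (hc : c ∉ p) :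
    ∀ xs : List (List Char),
      PySem.Chars.isIn p (PySem.Chars.join [c] xs) = xs.any (fun x => PySem.Chars.isIn p x)
  | [] => by
      rw [PySem.Chars.join_nil]
      apply Bool.eq_iff_iff.mpr
      simp [PySem.Chars.isIn_iff_infix, hp]
  | [x] => by
      rw [PySem.Chars.join_singleton]
      simp
  | x :: y :: rest => by
      rw [PySem.Chars.join_cons_cons, List.append_assoc, List.singleton_append]
      apply Bool.eq_iff_iff.mpr
      rw [PySem.Chars.isIn_iff_infix, pv_infix_split hc, ← PySem.Chars.isIn_iff_infix,
        ← PySem.Chars.isIn_iff_infix, pv_isIn_join c p hp hc (y :: rest)]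
      simp

-- the string-level form for the "\n" separator
theorem pv_isIn_join_str (pat : String) (hp : pat.toList ≠ []) (hc : '\n' ∉ pat.toList)
    (ys : List String) :
    PySem.Str.isIn pat (PySem.Str.join "\n" ys) = ys.any (fun s => PySem.Str.isIn pat s) := by
  simp only [PySem.Str.isIn_eq, PySem.Str.toList_join]
  rw [show ("\n" : String).toList = ['\n'] from rfl, pv_isIn_join '\n' pat.toList hp hc]
  rw [List.any_map]
  rfl

-- any over set(xs) equals any over xs (a set has the same members as the list it came from)
theorem pv_any_ofList {α : Type} [BEq α] [LawfulBEq α] (xs : List α) (p : α → Bool) :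
    (PySem.Set.ofList xs).any p = xs.any p := by
  apply Bool.eq_iff_iff.mpr
  simp [List.any_eq_true, PySem.Set.mem_ofList]

-- any of a disjunction is the disjunction of the anys
theorem pv_any_or {α : Type} (l : List α) (p q : α → Bool) :
    (l.any fun x => p x || q x) = (l.any p || l.any q) := by
  apply Bool.eq_iff_iff.mpr
  simp only [List.any_eq_true, Bool.or_eq_true]
  constructor
  · rintro ⟨x, hx, h | h⟩
    exacts [Or.inl ⟨x, hx, h⟩, Or.inr ⟨x, hx, h⟩]
  · rintro (⟨x, hx, h⟩ | ⟨x, hx, h⟩)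
    exacts [⟨x, hx, Or.inl h⟩, ⟨x, hx, Or.inr h⟩]

-- ===== VERDICT (by name: the statement is the Claim_ definition above) =====
theorem parse_allergens_spec : Claim_equal_parse_allergens := by
  intro allergens_tags _
  show _ = _
  simp only [parse_allergens, parse_allergens_alt]
  rw [pv_isIn_join_str "milk" (by decide) (by decide), pv_isIn_join_str "dairy" (by decide) (by decide),
    pv_isIn_join_str "gluten" (by decide) (by decide), pv_isIn_join_str "wheat" (by decide) (by decide),
    pv_isIn_join_str "nuts" (by decide) (by decide), pv_isIn_join_str "soy" (by decide) (by decide),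
    pv_isIn_join_str "egg" (by decide) (by decide), pv_isIn_join_str "fish" (by decide) (by decide),
    pv_isIn_join_str "shellfish" (by decide) (by decide), pv_isIn_join_str "crustacean" (by decide) (by decide),
    pv_isIn_join_str "peanut" (by decide) (by decide)]
  simp only [pv_any_ofList, pvMilk, pvGluten, pvNuts, pvSoy, pvEggs, pvFish, pvShellfish,
    pvPeanuts, pv_any_or, List.any_map, List.any_filter, Function.comp_def]
  rw [show (fun t => PySem.Str.isIn "nuts" (PySem.Str.lower t) &&
        !PySem.Str.isIn "peanut" (PySem.Str.lower t)) =
      (fun t => !PySem.Str.isIn "peanut" (PySem.Str.lower t) &&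
        PySem.Str.isIn "nuts" (PySem.Str.lower t)) from funext fun t => Bool.and_comm _ _]
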